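-- pv_equiv track=rewrite | github.com/reivaj2dev/bonoloto | App2.py | eliminarAgraciadas
-- ===== SOURCE A (Python) =====
-- def comprobar(c1, c2):
--     return len(set(c1).intersection(set(c2)))
--
-- def filtrar(sorteo, comb):
--     return comprobar(comb[0:6], sorteo) < 5
--
-- def eliminarAgraciadas(listaSorteos, combinaciones):
--     filtrado = []
--     index, size = 0, len(listaSorteos)
--     while index < size:
--         sorteo = listaSorteos[index]
--         combinaciones = list(filter(lambda x : filtrar(sorteo, x), combinaciones))
--         index += 1
--     return combinaciones
-- ===== SOURCE B (Python) =====
-- def eliminarAgraciadas(listaSorteos, combinaciones):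
--     # Inverted index: number -> indices of the draws containing it.
--     porNumero = {}
--     for i, s in enumerate(listaSorteos):
--         for v in set(s):
--             porNumero.setdefault(v, []).append(i)
--     res = []
--     for c in combinaciones:
--         # hits[i] = how many of c's first-6 distinct numbers draw i contains
--         hits = {}
--         for v in set(c[0:6]):
--             for i in porNumero.get(v, ()):
--                 hits[i] = hits.get(i, 0) + 1
--         if all(h < 5 for h in hits.values()):
--             res.append(c)
--     return res
-- ===== Notes on version B (the rewrite author's own statement) =====
-- stated objective: faster
-- what changed: A filters the whole candidate list once per draw, rebuilding both sets and intersecting them for every draw-candidate pair (touching every draw element per candidate); B builds an inverted index (number -> indices of the draws containing it) once, then for each candidate counts per-draw hits from the posting lists of its <=6 first-6 distinct numbers and keeps it iff every per-draw hit count stays below 5.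
import Mathlib
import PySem

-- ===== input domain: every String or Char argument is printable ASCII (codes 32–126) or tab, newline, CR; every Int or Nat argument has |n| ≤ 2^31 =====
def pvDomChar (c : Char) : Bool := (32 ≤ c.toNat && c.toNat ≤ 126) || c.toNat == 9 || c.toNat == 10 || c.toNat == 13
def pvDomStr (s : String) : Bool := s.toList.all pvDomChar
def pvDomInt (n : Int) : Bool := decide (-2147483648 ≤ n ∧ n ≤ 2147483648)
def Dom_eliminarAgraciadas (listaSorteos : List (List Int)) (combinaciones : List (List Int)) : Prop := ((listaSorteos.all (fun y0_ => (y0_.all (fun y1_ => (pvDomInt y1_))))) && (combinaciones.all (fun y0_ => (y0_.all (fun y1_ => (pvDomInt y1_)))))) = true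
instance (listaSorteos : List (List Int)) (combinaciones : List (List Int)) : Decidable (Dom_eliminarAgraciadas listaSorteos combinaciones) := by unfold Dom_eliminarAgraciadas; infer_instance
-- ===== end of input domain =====

-- B replaces A's per-draw re-filtering of the candidate list by an inverted index
-- (number -> indices of the draws containing it) built once, counting per candidate
-- how many of its first-6 numbers each draw contains; no per-pair set intersections.


-- ===== PORT A =====
def comprobar (c1 c2 : List Int) : Int :=
  PySem.Set.len (PySem.Set.inter (PySem.Set.ofList c1) (PySem.Set.ofList c2))

def filtrar (sorteo comb : List Int) : Bool :=
  decide (comprobar (PySem.List.slice comb (some 0) (some 6)) sorteo < 5)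

-- the while loop walks listaSorteos by index, re-filtering combinaciones each round
def eliminarAgraciadas (listaSorteos : List (List Int)) (combinaciones : List (List Int)) : List (List Int) :=
  listaSorteos.foldl (fun combs sorteo => combs.filter (fun x => filtrar sorteo x)) combinaciones

-- ===== PORT B =====
-- inverted index and hit counting; the sets are iterated only to build dicts whose
-- final contents do not depend on iteration order
def eliminarAgraciadas_alt (listaSorteos : List (List Int)) (combinaciones : List (List Int)) : List (List Int) :=
  let porNumero : PySem.Dict Int (List Int) :=
    (PySem.List.enumerate listaSorteos 0).foldl
      (fun d p => (PySem.Set.ofList p.2).foldl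
        (fun d v => d.modify v [] (fun l => l ++ [p.1])) d)
      PySem.Dict.empty
  combinaciones.foldl
    (fun res c =>
      let hits : PySem.Dict Int Int :=
        (PySem.Set.ofList (PySem.List.slice c (some 0) (some 6))).foldl
          (fun h v => (porNumero.getD v []).foldl (fun h i => h.modify i 0 (fun n => n + 1)) h)
          PySem.Dict.empty
      if hits.values.all (fun hcount => decide (hcount < 5)) then res ++ [c] else res)
    []

-- ===== PRECONDITION & SPEC =====
def Spec_eliminarAgraciadas (listaSorteos : List (List Int)) (combinaciones : List (List Int)) (out : List (List Int)) : Prop := out = eliminarAgraciadas_alt listaSorteos combinaciones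
instance (listaSorteos : List (List Int)) (combinaciones : List (List Int)) (out : List (List Int)) : Decidable (Spec_eliminarAgraciadas listaSorteos combinaciones out) := by unfold Spec_eliminarAgraciadas; infer_instance

-- ===== CLAIM (what is proved, stated in full; the proofs are below) =====
def Claim_equal_eliminarAgraciadas : Prop := ∀ (listaSorteos : List (List Int)) (combinaciones : List (List Int)), Dom_eliminarAgraciadas listaSorteos combinaciones → Spec_eliminarAgraciadas listaSorteos combinaciones (eliminarAgraciadas listaSorteos combinaciones)

-- ===== LEMMAS AND PROOFS =====

-- abbreviations for B's two dictionaries (proof-side names for the ports' lets)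
def pnOf (listaSorteos : List (List Int)) : PySem.Dict Int (List Int) :=
  (PySem.List.enumerate listaSorteos 0).foldl
    (fun d p => (PySem.Set.ofList p.2).foldl
      (fun d v => d.modify v [] (fun l => l ++ [p.1])) d)
    PySem.Dict.empty

def hitsOf (pn : PySem.Dict Int (List Int)) (c : List Int) : PySem.Dict Int Int :=
  (PySem.Set.ofList (PySem.List.slice c (some 0) (some 6))).foldl
    (fun h v => (pn.getD v []).foldl (fun h i => h.modify i 0 (fun n => n + 1)) h)
    PySem.Dict.empty

theorem alt_eq (ls cs : List (List Int)) :
    eliminarAgraciadas_alt ls cs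
      = cs.foldl (fun res c =>
          if (hitsOf (pnOf ls) c).values.all (fun hcount => decide (hcount < 5))
          then res ++ [c] else res) [] := rfl

-- iterated filtering over a list of draws = one filter by the conjunction of all tests
theorem foldl_filter_eq_filter_all (p : List Int → List Int → Bool) :
    ∀ (ss : List (List Int)) (xs : List (List Int)),
      ss.foldl (fun a s => a.filter (fun x => p s x)) xs
        = xs.filter (fun x => ss.all (fun s => p s x)) := by
  intro ss
  induction ss with
  | nil => intro xs; simp
  | cons s rest ih =>
    intro xs
    simp only [List.foldl_cons, ih, List.filter_filter, List.all_cons]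
    congr 1
    funext x
    exact Bool.and_comm _ _

-- one draw's pass over its distinct numbers appends its index to exactly v's posting list
theorem inner_post (i : Int) :
    ∀ (vs : List Int) (d : PySem.Dict Int (List Int)) (v : Int), vs.Nodup →
      ((vs.foldl (fun d w => d.modify w [] (fun l => l ++ [i])) d).getD v [])
        = d.getD v [] ++ (if v ∈ vs then [i] else []) := by
  intro vs
  induction vs with
  | nil => intro d v _; simp
  | cons w vs ih =>
    intro d v hnd
    rcases List.nodup_cons.mp hnd with ⟨hw, hnd'⟩
    rw [List.foldl_cons, ih _ v hnd', PySem.Dict.getD_modify]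
    by_cases hvw : v = w
    · subst hvw
      simp [hw]
    · simp [hvw, List.mem_cons]

-- the inverted index: v's posting list = indices of the enumerated draws containing v
theorem pn_getD :
    ∀ (es : List (Int × List Int)) (d : PySem.Dict Int (List Int)) (v : Int),
      ((es.foldl (fun d p => (PySem.Set.ofList p.2).foldl
          (fun d w => d.modify w [] (fun l => l ++ [p.1])) d) d).getD v [])
        = d.getD v [] ++ (es.filter (fun p => (PySem.Set.ofList p.2).contains v)).map (·.1) := by
  intro es
  induction es with
  | nil => intro d v; simp
  | cons p es ih =>
    intro d v
    rw [List.foldl_cons, ih, inner_post p.1 _ d v (PySem.Set.nodup_ofList p.2), List.filter_cons]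
    simp only [PySem.Set.contains_iff, PySem.Set.mem_ofList]
    by_cases h2 : v ∈ p.2 <;> simp [h2]

-- hit counts: getD of the nested counting fold = sum over v of k's occurrences in v's postings
theorem hits_getD (pn : PySem.Dict Int (List Int)) :
    ∀ (vs : List Int) (h0 : PySem.Dict Int Int) (k : Int),
      ((vs.foldl (fun h v => (pn.getD v []).foldl (fun h i => h.modify i 0 (fun n => n + 1)) h) h0).getD k 0)
        = h0.getD k 0 + (vs.map (fun v => (((pn.getD v []).count k : Nat) : Int))).sum := by
  intro vs
  induction vs with
  | nil => intro h0 k; simp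
  | cons v vs ih =>
    intro h0 k
    rw [List.foldl_cons, ih, PySem.Dict.getD_foldl_modify_add_one]
    simp [add_assoc]

-- the counting fold's keys: exactly the indices occurring in some consulted posting list
theorem mem_keys_hits (pn : PySem.Dict Int (List Int)) :
    ∀ (vs : List Int) (h0 : PySem.Dict Int Int) (k : Int),
      (k ∈ (vs.foldl (fun h v => (pn.getD v []).foldl (fun h i => h.modify i 0 (fun n => n + 1)) h) h0).keys)
        ↔ k ∈ h0.keys ∨ ∃ v ∈ vs, k ∈ pn.getD v [] := by
  intro vs
  induction vs with
  | nil => intro h0 k; simp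
  | cons v vs ih =>
    intro h0 k
    rw [List.foldl_cons, ih, PySem.Dict.keys_foldl_modify, PySem.Set.mem_update]
    constructor
    · rintro (⟨h | h⟩ | ⟨w, hw, hk⟩)
      · exact Or.inl h
      · exact Or.inr ⟨v, List.mem_cons_self, h⟩
      · exact Or.inr ⟨w, List.mem_cons_of_mem _ hw, hk⟩
    · rintro (h | ⟨w, hw, hk⟩)
      · exact Or.inl (Or.inl h)
      · rcases List.mem_cons.mp hw with rfl | hw'
        · exact Or.inl (Or.inr hk)
        · exact Or.inr ⟨w, hw', hk⟩

-- the counting fold keeps the keys list duplicate-free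
theorem nodup_keys_hits (pn : PySem.Dict Int (List Int)) :
    ∀ (vs : List Int) (h0 : PySem.Dict Int Int), h0.keys.Nodup →
      (vs.foldl (fun h v => (pn.getD v []).foldl (fun h i => h.modify i 0 (fun n => n + 1)) h) h0).keys.Nodup := by
  intro vs
  induction vs with
  | nil => intro h0 h; exact h
  | cons v vs ih =>
    intro h0 h
    rw [List.foldl_cons]
    apply ih
    rw [PySem.Dict.keys_foldl_modify]
    exact PySem.Set.nodup_update _ _ h

-- all() over a dict's values, read through getD (keys duplicate-free)
theorem values_all_iff (d : PySem.Dict Int Int) (hnd : d.keys.Nodup) (p : Int → Bool) :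
    (d.values.all p = true) ↔ ∀ k ∈ d.keys, p (d.getD k 0) = true := by
  rw [List.all_eq_true]
  constructor
  · intro h k hk
    rcases List.mem_map.mp hk with ⟨pr, hpr, hfst⟩
    have hgd : d.getD pr.1 0 = pr.2 := PySem.Dict.getD_of_mem_items d hpr hnd 0
    rw [← hfst, hgd]
    exact h pr.2 (List.mem_map.mpr ⟨pr, hpr, rfl⟩)
  · intro h v hv
    rcases List.mem_map.mp hv with ⟨pr, hpr, hsnd⟩
    have hk : pr.1 ∈ d.keys := List.mem_map.mpr ⟨pr, hpr, rfl⟩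
    have hgd : d.getD pr.1 0 = pr.2 := PySem.Dict.getD_of_mem_items d hpr hnd 0
    have := h pr.1 hk
    rw [hgd, hsnd] at this
    exact this

-- in a list of pairs with duplicate-free first components, counting k among the first
-- components of a filtered sublist sees only the unique pair (k, s)
theorem count_fst_filter :
    ∀ (es : List (Int × List Int)) (q : (Int × List Int) → Bool) (k : Int) (s : List Int),
      (es.map (·.1)).Nodup → (k, s) ∈ es →
      ((es.filter q).map (·.1)).count k = if q (k, s) then 1 else 0 := by
  intro es
  induction es with
  | nil => intro q k s _ h; cases h
  | cons p es ih =>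
    intro q k s hnd hmem
    rw [List.map_cons] at hnd
    rcases List.nodup_cons.mp hnd with ⟨hp, hnd'⟩
    rcases List.mem_cons.mp hmem with rfl | hmem'
    · -- the pair is the head; k does not occur among the tail's first components
      have hzero : ((es.filter q).map (·.1)).count k = 0 := by
        rw [List.count_eq_zero]
        intro hk
        rcases List.mem_map.mp hk with ⟨pr, hpr, hfst⟩
        exact hp (List.mem_map.mpr ⟨pr, List.mem_of_mem_filter hpr, hfst⟩)
      rw [List.filter_cons]
      by_cases hq : q (k, s)
      · simp [hq, hzero]
      · simp [hq, hzero]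
    · -- the pair is in the tail; the head's first component differs from k
      have hk : k ∈ es.map (·.1) := List.mem_map.mpr ⟨(k, s), hmem', rfl⟩
      have hne : p.1 ≠ k := fun h => hp (h ▸ hk)
      rw [List.filter_cons]
      by_cases hq : q p
      · simp only [hq, if_true, List.map_cons, List.count_cons]
        rw [ih q k s hnd' hmem']
        simp [hne]
      · simp only [hq]
        exact ih q k s hnd' hmem'

-- for an enumerated draw (k, s): the hit count at key k is the shared-numbers count
theorem hits_getD_eq_comprobar (ls : List (List Int)) (c : List Int) (k : Int) (s : List Int)
    (hmem : (k, s) ∈ PySem.List.enumerate ls 0) :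
    (hitsOf (pnOf ls) c).getD k 0 = comprobar (PySem.List.slice c (some 0) (some 6)) s := by
  have hnd : ((PySem.List.enumerate ls 0).map (·.1)).Nodup := by
    rw [PySem.List.map_fst_enumerate]
    exact PySem.List.nodup_pyRange_one _ _
  unfold hitsOf
  rw [hits_getD, PySem.Dict.getD_empty, zero_add]
  have hpost : ∀ v : Int, (pnOf ls).getD v []
      = ((PySem.List.enumerate ls 0).filter (fun p => (PySem.Set.ofList p.2).contains v)).map (·.1) := by
    intro v
    unfold pnOf
    rw [pn_getD, PySem.Dict.getD_empty, List.nil_append]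
  have hmapeq : (PySem.Set.ofList (PySem.List.slice c (some 0) (some 6))).map
        (fun v => ((((pnOf ls).getD v []).count k : Nat) : Int))
      = (PySem.Set.ofList (PySem.List.slice c (some 0) (some 6))).map
        (fun v => if (PySem.Set.ofList s).contains v then 1 else 0) := by
    apply List.map_congr_left
    intro v _
    rw [hpost v, count_fst_filter _ _ k s hnd hmem]
    by_cases hv : (PySem.Set.ofList s).contains v
    · simp
    · simp
  rw [hmapeq, PySem.List.sum_map_ite_one_zero]
  unfold comprobar PySem.Set.inter PySem.Set.len
  rw [← List.countP_eq_length_filter]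

-- per-candidate agreement of the two tests
theorem tests_agree (ls : List (List Int)) (c : List Int) :
    ls.all (fun s => filtrar s c)
      = (hitsOf (pnOf ls) c).values.all (fun hcount => decide (hcount < 5)) := by
  have hnd : (hitsOf (pnOf ls) c).keys.Nodup := by
    unfold hitsOf
    exact nodup_keys_hits _ _ _ (by simp [PySem.Dict.keys_empty])
  rw [Bool.eq_iff_iff, List.all_eq_true, values_all_iff _ hnd]
  simp only [filtrar, decide_eq_true_eq]
  constructor
  · intro h k hk
    rcases (mem_keys_hits _ _ _ _).mp hk with h' | ⟨v, _, hkpost⟩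
    · simp [PySem.Dict.keys_empty] at h'
    · -- k is the index of some enumerated draw
      unfold pnOf at hkpost
      rw [pn_getD, PySem.Dict.getD_empty, List.nil_append] at hkpost
      rcases List.mem_map.mp hkpost with ⟨pr, hpr, hfst⟩
      have hmem : (k, pr.2) ∈ PySem.List.enumerate ls 0 := by
        rw [← hfst]
        exact List.mem_of_mem_filter hpr
      have hsl : pr.2 ∈ ls := by
        have : pr.2 ∈ (PySem.List.enumerate ls 0).map (·.2) :=
          List.mem_map.mpr ⟨pr, List.mem_of_mem_filter hpr, rfl⟩
        rwa [PySem.List.map_snd_enumerate] at this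
      rw [hits_getD_eq_comprobar ls c k pr.2 hmem]
      exact h pr.2 hsl
  · intro h s hs
    have : s ∈ (PySem.List.enumerate ls 0).map (·.2) := by
      rwa [PySem.List.map_snd_enumerate]
    rcases List.mem_map.mp this with ⟨pr, hpr, hsnd⟩
    have hmem : (pr.1, s) ∈ PySem.List.enumerate ls 0 := by
      rw [← hsnd]
      exact hpr
    rw [← hits_getD_eq_comprobar ls c pr.1 s hmem]
    by_cases hk : pr.1 ∈ (hitsOf (pnOf ls) c).keys
    · exact h pr.1 hk
    · have : (hitsOf (pnOf ls) c).contains pr.1 = false :=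
        Bool.eq_false_iff.mpr (fun h => hk ((PySem.Dict.contains_iff_mem_keys _ _).mp h))
      rw [PySem.Dict.getD_of_not_contains _ _ this]
      omega

-- ===== VERDICT (by name: the statement is the Claim_ definition above) =====
theorem eliminarAgraciadas_spec : Claim_equal_eliminarAgraciadas := by
  intro ls cs _
  show eliminarAgraciadas ls cs = eliminarAgraciadas_alt ls cs
  rw [alt_eq]
  unfold eliminarAgraciadas
  rw [foldl_filter_eq_filter_all (fun s x => filtrar s x),
    PySem.List.foldl_append_if (f := fun c => c)]
  simp only [List.nil_append, List.map_id_fun', id]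
  apply List.filter_congr
  intro c _
  exact tests_agree ls c
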